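-- pv_equiv track=rewrite | github.com/vbhavank/ProbabilisticActionSegmentRefiener | rafid_v1.py | bounds
-- ===== SOURCE A (Python) =====
-- def bounds(segm):
--     start_label = segm[0]
--     start_idx = 0
--     idx = 0
--     while idx < len(segm):
--         try:
--             while start_label == segm[idx]:
--                 idx += 1
--         except IndexError:
--             yield start_idx, idx, start_label
--             break
--
--         yield start_idx, idx, start_label
--         start_idx = idx
--         start_label = segm[start_idx]
-- ===== SOURCE B (Python) =====
-- def bounds(segm):
--     n = len(segm)
--     cuts = [i for i in range(1, n) if segm[i] != segm[i - 1]]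
--     edges = [0] + cuts + [n]
--     for a, b in zip(edges, edges[1:]):
--         yield a, b, segm[a]
-- ===== Notes on version B (the rewrite author's own statement) =====
-- stated objective: alternative
-- what changed: Replaces A's stateful run-skipping state machine (nested while with IndexError-driven termination and a running start_label/start_idx) by two stateless staged passes: a neighbour-comparison filter that collects all cut indices, then a zip of consecutive edges that emits (a, b, segm[a]) pairs.
import Mathlib
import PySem

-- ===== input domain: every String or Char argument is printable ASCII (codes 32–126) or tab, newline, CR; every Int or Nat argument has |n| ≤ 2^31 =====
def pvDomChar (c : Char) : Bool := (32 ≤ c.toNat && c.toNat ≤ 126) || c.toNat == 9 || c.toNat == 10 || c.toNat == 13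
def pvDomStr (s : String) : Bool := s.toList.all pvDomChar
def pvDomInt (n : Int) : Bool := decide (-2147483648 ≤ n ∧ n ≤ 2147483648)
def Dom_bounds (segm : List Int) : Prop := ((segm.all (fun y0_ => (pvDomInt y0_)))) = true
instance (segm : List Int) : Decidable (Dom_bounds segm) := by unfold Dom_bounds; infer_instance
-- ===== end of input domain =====

-- B replaces A's stateful run-skipping state machine by two stateless staged passes:
-- a neighbour-comparison filter collecting cut indices, then a zip of consecutive edges.
-- Both A and B are generators that raise IndexError on the empty list; Pre_ excludes it.

-- ===== PORT A =====
-- A's inner `while start_label == segm[idx]: idx += 1`; returns the idx at which it stops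
-- (idx = segm.length models the IndexError being raised there and caught by A).
def pvInner (segm : List Int) (label : Int) (idx : Nat) : Nat :=
  if h : idx < segm.length then
    if segm[idx] = label then pvInner segm label (idx + 1) else idx
  else idx
termination_by segm.length - idx
decreasing_by exact Nat.sub_succ_lt_self _ _ h

-- used only for pvOuter's termination
theorem pvInner_ge (segm : List Int) (label : Int) (idx : Nat) :
    idx ≤ pvInner segm label idx := by
  unfold pvInner
  split
  · split
    · exact Nat.le_of_succ_le (pvInner_ge segm label (idx + 1))
    · exact Nat.le_refl idx
  · exact Nat.le_refl idx
termination_by segm.length - idx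
decreasing_by exact Nat.sub_succ_lt_self _ _ (by assumption)

-- used only for pvOuter's termination
theorem pvInner_gt (segm : List Int) (label : Int) (idx : Nat)
    (h : segm.getD idx label = label) (hj : pvInner segm label idx < segm.length) :
    idx < pvInner segm label idx := by
  have hi : idx < segm.length := Nat.lt_of_le_of_lt (pvInner_ge segm label idx) hj
  have hsl : segm[idx] = label := by
    rwa [List.getD_eq_getElem?_getD, List.getElem?_eq_getElem hi, Option.getD_some] at h
  rw [pvInner, dif_pos hi, if_pos hsl]
  exact Nat.lt_of_lt_of_le (Nat.lt_succ_self idx) (pvInner_ge segm label (idx + 1))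

-- A's outer while loop: state (start_label, start_idx, idx); each round runs the inner
-- while, then either yields-and-breaks (IndexError path) or yields and restarts.
def pvOuter (segm : List Int) (label : Int) (start idx : Nat)
    (h : segm.getD idx label = label) : List (Int × Int × Int) :=
  let j := pvInner segm label idx
  if hj : j < segm.length then
    ((start : Int), (j : Int), label) ::
      pvOuter segm segm[j] j j
        (by rw [List.getD_eq_getElem?_getD, List.getElem?_eq_getElem hj, Option.getD_some])
  else [((start : Int), (j : Int), label)]
termination_by segm.length - idx
decreasing_by
  exact Nat.sub_lt_sub_left (Nat.lt_trans (pvInner_gt segm label idx h hj) hj)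
    (pvInner_gt segm label idx h hj)

def bounds (segm : List Int) : List (Int × Int × Int) :=
  match segm with
  | [] => []  -- A raises IndexError at `segm[0]`; excluded by Pre_bounds
  | s0 :: rest => pvOuter (s0 :: rest) s0 0 0 (by simp)

-- ===== PORT B =====
-- pass 1: cut indices where segm[i] != segm[i-1]; pass 2: zip consecutive edges.
def bounds_alt (segm : List Int) : List (Int × Int × Int) :=
  let n : Int := (segm.length : Int)
  let cuts := (PySem.List.pyRange 1 n 1).filter
    (fun i => PySem.List.pyGetD segm i 0 != PySem.List.pyGetD segm (i - 1) 0)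
  let edges := 0 :: (cuts ++ [n])
  (List.zip edges edges.tail).map (fun ab => (ab.1, ab.2, PySem.List.pyGetD segm ab.1 0))
  -- on [] Python B raises IndexError lazily at segm[0]; excluded by Pre_bounds

-- ===== PRECONDITION & SPEC =====
-- Pre_ excludes exactly the empty list, on which A (and B) raises IndexError.
def Pre_bounds (segm : List Int) : Prop := segm ≠ []
instance (segm : List Int) : Decidable (Pre_bounds segm) := by unfold Pre_bounds; infer_instance
def pvWitness_bounds : List Int := [1, 1, 2]

def Spec_bounds (segm : List Int) (out : List (Int × Int × Int)) : Prop := out = bounds_alt segm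
instance (segm : List Int) (out : List (Int × Int × Int)) : Decidable (Spec_bounds segm out) := by unfold Spec_bounds; infer_instance

-- ===== CLAIM (what is proved, stated in full; the proofs are below) =====
def Claim_equal_bounds : Prop := ∀ (segm : List Int), Dom_bounds segm → Pre_bounds segm → Spec_bounds segm (bounds segm)

-- ===== LEMMAS AND PROOFS =====

-- the zipped-edges pass as a structural recursion: emit (s, b, segm[s]) per edge pair
def pvG (segm : List Int) : Int → List Int → List (Int × Int × Int)
  | _, [] => []
  | s, b :: t => (s, b, PySem.List.pyGetD segm s 0) :: pvG segm b t

-- Fuel-indexed version of pvOuter (no precondition argument), the proofs' middle man.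
def pvF (segm : List Int) (fuel : Nat) (label : Int) (s : Int) (i : Nat) :
    List (Int × Int × Int) :=
  match fuel with
  | 0 => []
  | fuel + 1 =>
    let j := pvInner segm label i
    if j < segm.length then
      (s, (j : Int), label) :: pvF segm fuel (segm.getD j 0) (j : Int) j
    else [(s, (j : Int), label)]

theorem pvInner_succ (segm : List Int) (label : Int) (idx : Nat)
    (hi : idx < segm.length) (hl : segm[idx] = label) :
    pvInner segm label idx = pvInner segm label (idx + 1) := by
  rw [pvInner, dif_pos hi, if_pos hl]

theorem pvF_skip (segm : List Int) (fuel : Nat) (label : Int) (s : Int) (i : Nat)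
    (hi : i < segm.length) (hl : segm[i] = label) :
    pvF segm (fuel + 1) label s i = pvF segm (fuel + 1) label s (i + 1) := by
  simp only [pvF, pvInner_succ segm label i hi hl]

theorem pvOuter_eq_pvF (segm : List Int) (fuel : Nat) :
    ∀ (label : Int) (start idx : Nat) (h : segm.getD idx label = label),
    segm.length - idx < fuel →
    pvOuter segm label start idx h = pvF segm fuel label (start : Int) idx := by
  induction fuel with
  | zero => intro _ _ _ _ hf; omega
  | succ fuel ih =>
    intro label start idx h hf
    rw [pvOuter, pvF]
    by_cases hj : pvInner segm label idx < segm.length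
    · rw [dif_pos hj, if_pos hj]
      have hgt := pvInner_gt segm label idx h hj
      have hgd : segm.getD (pvInner segm label idx) 0 = segm[pvInner segm label idx] := by
        rw [List.getD_eq_getElem?_getD, List.getElem?_eq_getElem hj, Option.getD_some]
      rw [ih segm[pvInner segm label idx] (pvInner segm label idx) (pvInner segm label idx) _
            (by omega), hgd]
    · rw [dif_neg hj, if_neg hj]

-- zip-with-tail over (s :: r) is exactly the structural pass pvG
theorem pvZip_eq_pvG (segm : List Int) :
    ∀ (r : List Int) (s : Int),
    (List.zip (s :: r) r).map (fun ab => (ab.1, ab.2, PySem.List.pyGetD segm ab.1 0))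
      = pvG segm s r := by
  intro r
  induction r with
  | nil => intro s; rfl
  | cons b t ih => intro s; simp only [List.zip_cons_cons, List.map_cons, pvG, ih b]

-- the staged passes agree with A's state machine: invariant — the run starting at s has
-- label `label`, positions [s, i) all carry it (we only need segm[i-1] = label).
theorem pvG_filter_eq_pvF (segm : List Int) :
    ∀ (k i : Nat), segm.length - i = k → 1 ≤ i → i ≤ segm.length →
    ∀ (s label : Int) (fuel : Nat),
    segm.getD (i - 1) 0 = label → PySem.List.pyGetD segm s 0 = label →
    segm.length - i < fuel →
    pvG segm s (((PySem.List.pyRange (i : Int) (segm.length : Int) 1).filter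
        (fun j => PySem.List.pyGetD segm j 0 != PySem.List.pyGetD segm (j - 1) 0))
      ++ [(segm.length : Int)])
      = pvF segm fuel label s i := by
  intro k
  induction k using Nat.strong_induction_on with
  | _ k ih =>
    intro i hk h1 hle s label fuel hprev hs hf
    obtain ⟨f, rfl⟩ : ∃ f, fuel = f + 1 := ⟨fuel - 1, by omega⟩
    by_cases hlt : i < segm.length
    · have hcons : PySem.List.pyRange (i : Int) (segm.length : Int) 1
          = (i : Int) :: PySem.List.pyRange ((i : Int) + 1) (segm.length : Int) 1 :=
        PySem.List.pyRange_one_cons (by exact_mod_cast hlt)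
      have hvi : PySem.List.pyGetD segm (i : Int) 0 = segm[i] := by
        rw [PySem.List.pyGetD_natCast, List.getD_eq_getElem?_getD,
            List.getElem?_eq_getElem hlt, Option.getD_some]
      have hvprev : PySem.List.pyGetD segm ((i : Int) - 1) 0 = label := by
        have : (i : Int) - 1 = ((i - 1 : Nat) : Int) := by omega
        rw [this, PySem.List.pyGetD_natCast, hprev]
      by_cases hl : segm[i] = label
      · -- inside the run: no cut at i, A's inner while skips i
        have hfc : (PySem.List.pyRange (i : Int) (segm.length : Int) 1).filter
              (fun j => PySem.List.pyGetD segm j 0 != PySem.List.pyGetD segm (j - 1) 0)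
            = (PySem.List.pyRange ((i : Int) + 1) (segm.length : Int) 1).filter
              (fun j => PySem.List.pyGetD segm j 0 != PySem.List.pyGetD segm (j - 1) 0) := by
          rw [hcons, List.filter_cons]
          simp [hvi, hvprev, hl]
        rw [hfc, pvF_skip segm f label s i hlt hl]
        have : ((i : Int) + 1) = (((i + 1 : Nat)) : Int) := by push_cast; ring
        rw [this]
        exact ih (segm.length - (i + 1)) (by omega) (i + 1) rfl (by omega) (by omega)
          s label (f + 1)
          (by rw [Nat.add_sub_cancel, List.getD_eq_getElem?_getD,
                List.getElem?_eq_getElem hlt, Option.getD_some]; exact hl)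
          hs (by omega)
      · -- cut at i: both emit (s, i, label) and restart at i
        have hfc : (PySem.List.pyRange (i : Int) (segm.length : Int) 1).filter
              (fun j => PySem.List.pyGetD segm j 0 != PySem.List.pyGetD segm (j - 1) 0)
            = (i : Int) :: (PySem.List.pyRange ((i : Int) + 1) (segm.length : Int) 1).filter
              (fun j => PySem.List.pyGetD segm j 0 != PySem.List.pyGetD segm (j - 1) 0) := by
          rw [hcons, List.filter_cons]
          simp [hvi, hvprev, hl]
        have hIj : pvInner segm label i = i := by
          rw [pvInner, dif_pos hlt, if_neg hl]
        have hgd : segm.getD i 0 = segm[i] := by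
          rw [List.getD_eq_getElem?_getD, List.getElem?_eq_getElem hlt, Option.getD_some]
        obtain ⟨f', rfl⟩ : ∃ f', f = f' + 1 := ⟨f - 1, by omega⟩
        have hFi : pvF segm (f' + 1 + 1) label s i
            = (s, (i : Int), label) :: pvF segm (f' + 1) segm[i] (i : Int) i := by
          simp only [pvF, hIj, if_pos hlt, hgd]
        rw [hfc, hFi, pvF_skip segm f' segm[i] (i : Int) i hlt rfl]
        simp only [List.cons_append, pvG, hs]
        have hstep : ((i : Int) + 1) = (((i + 1 : Nat)) : Int) := by push_cast; ring
        rw [hstep, ih (segm.length - (i + 1)) (by omega) (i + 1) rfl (by omega) (by omega)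
          (i : Int) segm[i] (f' + 1) (by simpa using hgd) hvi (by omega)]
    · -- i = segm.length: empty range, single trailing flush on both sides
      have hie : i = segm.length := by omega
      subst hie
      have hIj : pvInner segm label segm.length = segm.length := by
        rw [pvInner, dif_neg hlt]
      simp only [PySem.List.pyRange_one_eq_nil (le_refl ((segm.length : Nat) : Int)),
        List.filter_nil, List.nil_append, pvG, pvF, hIj, if_neg hlt, hs]

theorem bounds_spec : Claim_equal_bounds := by
  intro segm _ hpre
  unfold Spec_bounds
  match segm, hpre with
  | s0 :: rest, _ =>
    have hlen : 0 < (s0 :: rest).length := by simp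
    have h0 : (s0 :: rest)[0] = s0 := rfl
    have halt : bounds_alt (s0 :: rest)
        = pvG (s0 :: rest) 0
            ((((PySem.List.pyRange ((1 : Nat) : Int) (((s0 :: rest).length : Nat) : Int) 1).filter
              (fun j => PySem.List.pyGetD (s0 :: rest) j 0
                != PySem.List.pyGetD (s0 :: rest) (j - 1) 0)))
              ++ [(((s0 :: rest).length : Nat) : Int)]) := by
      rw [bounds_alt]
      simp only [List.tail_cons]
      rw [pvZip_eq_pvG (s0 :: rest) _ 0]
      norm_num
    rw [bounds, halt,
        pvG_filter_eq_pvF (s0 :: rest) ((s0 :: rest).length - 1) 1 rfl (le_refl 1) hlen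
          0 s0 ((s0 :: rest).length + 1) (by simp) (by simp [PySem.List.pyGetD]) (by omega),
        pvOuter_eq_pvF (s0 :: rest) ((s0 :: rest).length + 1) s0 0 0 (by simp) (by omega)]
    have := pvF_skip (s0 :: rest) (s0 :: rest).length s0 0 0 hlen h0
    simpa using this
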